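-- pv_equiv track=rewrite | github.com/marmengolroig/Obelix | ClassLibrary/utils.py | decimal_to_four_digit_octal
-- ===== SOURCE A (Python) =====
-- def decimal_to_four_digit_octal(decimal):
--     octal = 0
--     count = 1
--
--     while decimal > 0:
--         r = decimal % 8
--         octal += r * count
--         count *= 10
--         decimal = decimal // 8
--
--     octal = str(octal)
--
--     if len(octal) < 4:
--         if len(octal) == 3:
--             octal = '0'+ octal
--         elif len(octal) == 2:
--             octal = '00'+ octal
--         elif len(octal) == 1:
--             octal = '000'+ octal
--
--     return(octal)
-- ===== SOURCE B (Python) =====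
-- def decimal_to_four_digit_octal(decimal):
--     s = format(decimal, 'o') if decimal > 0 else '0'
--     return s.zfill(4)
-- ===== Notes on version B (the rewrite author's own statement) =====
-- stated objective: idiomatic
-- what changed: Replaces the hand-rolled base conversion (a loop accumulating the octal digits as a decimal-positional integer, then str() and an explicit length-3/2/1 padding cascade) with the built-in format(decimal, 'o') plus str.zfill(4); the '> 0' guard mirrors A's loop condition so 0 and negatives give '0000'.
import Mathlib
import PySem

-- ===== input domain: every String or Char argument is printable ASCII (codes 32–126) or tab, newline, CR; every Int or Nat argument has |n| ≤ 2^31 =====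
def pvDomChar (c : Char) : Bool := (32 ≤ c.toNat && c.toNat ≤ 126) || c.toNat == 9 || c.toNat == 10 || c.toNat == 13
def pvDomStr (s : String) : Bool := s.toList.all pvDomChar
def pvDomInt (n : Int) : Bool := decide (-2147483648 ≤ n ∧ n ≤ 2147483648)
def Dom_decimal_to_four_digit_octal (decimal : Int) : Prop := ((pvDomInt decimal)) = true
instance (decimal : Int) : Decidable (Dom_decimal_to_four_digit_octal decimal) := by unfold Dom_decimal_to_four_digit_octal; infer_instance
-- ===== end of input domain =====

-- B replaces A's hand-rolled decimal-accumulator octal conversion and padding cascade with format(n,'o') + zfill(4) (idiomatic; same behaviour, return value only).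


-- ===== PORT A =====
-- the while loop: state (decimal, octal, count)
def pvLoopA (decimal octal count : Int) : Int :=
  if h : decimal > 0 then
    pvLoopA (PySem.Int.floordiv decimal 8) (octal + PySem.Int.mod decimal 8 * count) (count * 10)
  else octal
termination_by decimal.toNat
decreasing_by
  rw [PySem.Int.floordiv_eq_ediv_of_pos (by omega)]
  omega

def decimal_to_four_digit_octal (decimal : Int) : String :=
  let octal := pvLoopA decimal 0 1
  let cs := PySem.Int.toChars octal          -- octal = str(octal)
  let cs' :=
    if cs.length < 4 then
      if cs.length = 3 then '0' :: cs
      else if cs.length = 2 then '0' :: '0' :: cs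
      else if cs.length = 1 then '0' :: '0' :: '0' :: cs
      else cs
    else cs
  String.ofList cs'

-- ===== PORT B =====
-- format(n, 'o') for n > 0, hand-ported (exact: octal digits, most significant first)
def pvOctChars (n : Nat) : List Char :=
  if n = 0 then [] else pvOctChars (n / 8) ++ [Nat.digitChar (n % 8)]
termination_by n
decreasing_by exact Nat.div_lt_self (by omega) (by norm_num)

def decimal_to_four_digit_octal_alt (decimal : Int) : String :=
  let s := if decimal > 0 then String.ofList (pvOctChars decimal.toNat) else "0"
  PySem.Str.zfill s 4

-- ===== PRECONDITION & SPEC =====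
def Spec_decimal_to_four_digit_octal (decimal : Int) (out : String) : Prop := out = decimal_to_four_digit_octal_alt decimal
instance (decimal : Int) (out : String) : Decidable (Spec_decimal_to_four_digit_octal decimal out) := by unfold Spec_decimal_to_four_digit_octal; infer_instance

-- ===== CLAIM (what is proved, stated in full; the proofs are below) =====
def Claim_equal_decimal_to_four_digit_octal : Prop := ∀ (decimal : Int), Dom_decimal_to_four_digit_octal decimal → Spec_decimal_to_four_digit_octal decimal (decimal_to_four_digit_octal decimal)

-- ===== LEMMAS AND PROOFS =====

-- the number A's loop accumulates: the base-8 digits of n written in base-10 positions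
def pvON (n : Nat) : Nat :=
  if n = 0 then 0 else n % 8 + 10 * pvON (n / 8)
termination_by n
decreasing_by exact Nat.div_lt_self (by omega) (by norm_num)

-- the decimal digit characters of n, most significant first (what Nat.toDigits 10 computes)
def pvDecChars (n : Nat) : List Char :=
  if n < 10 then [Nat.digitChar n] else pvDecChars (n / 10) ++ [Nat.digitChar (n % 10)]
termination_by n
decreasing_by exact Nat.div_lt_self (by omega) (by norm_num)

lemma pvToDigitsCore_eq (f : Nat) : ∀ n ds, n < f →
    Nat.toDigitsCore 10 f n ds = pvDecChars n ++ ds := by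
  induction f with
  | zero => intro n ds h; omega
  | succ f ih =>
    intro n ds h
    rw [Nat.toDigitsCore]
    by_cases h10 : n < 10
    · have : n / 10 = 0 := by omega
      rw [pvDecChars]
      simp [this, h10, Nat.mod_eq_of_lt h10]
    · have hd : n / 10 ≠ 0 := by omega
      have : n / 10 < f := by
        have := Nat.div_lt_self (by omega : 0 < n) (by norm_num : 1 < 10)
        omega
      simp only [hd]
      rw [ih (n / 10) _ this]
      conv_rhs => rw [pvDecChars]
      simp [h10]

lemma pvToDigits_eq (n : Nat) : Nat.toDigits 10 n = pvDecChars n := by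
  have := pvToDigitsCore_eq (n + 1) n [] (by omega)
  simpa [Nat.toDigits] using this

lemma pvON_pos (n : Nat) (h : 0 < n) : 0 < pvON n := by
  induction n using Nat.strong_induction_on with
  | _ n ih =>
    rw [pvON, if_neg (by omega : ¬ n = 0)]
    by_cases h8 : n % 8 = 0
    · have hd : 0 < n / 8 := by omega
      have := ih (n / 8) (Nat.div_lt_self h (by norm_num)) hd
      omega
    · omega

lemma pvLoopA_eq (n : Nat) : ∀ octal count : Int,
    pvLoopA (n : Int) octal count = octal + count * (pvON n : Int) := by
  induction n using Nat.strong_induction_on with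
  | _ n ih =>
    intro octal count
    by_cases h : 0 < n
    · rw [pvLoopA]
      have hpos : ((n : Int) > 0) := by exact_mod_cast h
      rw [dif_pos hpos]
      rw [PySem.Int.floordiv_eq_ediv_of_pos (by norm_num), PySem.Int.mod_eq_emod_of_pos (by norm_num)]
      have e1 : (n : Int) / 8 = ((n / 8 : Nat) : Int) := by omega
      have e2 : (n : Int) % 8 = ((n % 8 : Nat) : Int) := by omega
      rw [e1, e2, ih (n / 8) (Nat.div_lt_self h (by norm_num))]
      conv_rhs => rw [pvON]
      rw [if_neg (by omega : ¬ n = 0)]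
      push_cast
      ring
    · have hn : n = 0 := by omega
      subst hn
      rw [pvLoopA, dif_neg (by norm_num), pvON]
      norm_num

lemma pvDecChars_head (m : Nat) : ∃ d cs, d < 10 ∧ pvDecChars m = Nat.digitChar d :: cs := by
  induction m using Nat.strong_induction_on with
  | _ m ih =>
    rw [pvDecChars]
    by_cases h : m < 10
    · exact ⟨m, [], h, by simp [h]⟩
    · obtain ⟨d, cs, hd, heq⟩ := ih (m / 10) (Nat.div_lt_self (by omega) (by norm_num))
      exact ⟨d, cs ++ [Nat.digitChar (m % 10)], hd, by simp [h, heq]⟩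

lemma pvDec_of_ON (n : Nat) (h : 0 < n) : pvDecChars (pvON n) = pvOctChars n := by
  induction n using Nat.strong_induction_on with
  | _ n ih =>
    have hON : pvON n = n % 8 + 10 * pvON (n / 8) := by
      rw [pvON, if_neg (by omega : ¬ n = 0)]
    by_cases hd : n / 8 = 0
    · have hlt : n < 8 := by omega
      have : pvON n = n := by rw [hON, hd, pvON]; simp [Nat.mod_eq_of_lt hlt]
      rw [this, pvDecChars, if_pos (by omega)]
      rw [pvOctChars, if_neg (by omega : ¬ n = 0), hd, pvOctChars]
      simp [Nat.mod_eq_of_lt hlt]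
    · have hrec : 0 < pvON (n / 8) := pvON_pos _ (by omega)
      have h10 : ¬ pvON n < 10 := by omega
      rw [pvDecChars, if_neg h10]
      have hdiv : pvON n / 10 = pvON (n / 8) := by omega
      have hmod : pvON n % 10 = n % 8 := by omega
      rw [hdiv, hmod, ih (n / 8) (Nat.div_lt_self h (by norm_num)) (by omega)]
      conv_rhs => rw [pvOctChars]
      rw [if_neg (by omega : ¬ n = 0)]

-- A's padding cascade equals zfill 4, for a non-empty digit string (head not a sign)
lemma pvPad_eq (c : Char) (rest : List Char) (h1 : c ≠ '+') (h2 : c ≠ '-') :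
    (if (c :: rest).length < 4 then
      if (c :: rest).length = 3 then '0' :: c :: rest
      else if (c :: rest).length = 2 then '0' :: '0' :: c :: rest
      else if (c :: rest).length = 1 then '0' :: '0' :: '0' :: c :: rest
      else c :: rest
    else c :: rest) = PySem.Chars.zfill (c :: rest) 4 := by
  rcases rest with _ | ⟨a, _ | ⟨b, _ | ⟨d, t⟩⟩⟩
  · simp [PySem.Chars.zfill, h1, h2]
  · simp [PySem.Chars.zfill, h1, h2]
  · simp [PySem.Chars.zfill, h1, h2]
  · have hge : (4 : Int) ≤ ((c :: a :: b :: d :: t).length : Int) := by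
      simp only [List.length_cons]; push_cast; omega
    have hlt : ¬ ((c :: a :: b :: d :: t).length < 4) := by
      simp only [List.length_cons]; omega
    rw [PySem.Chars.zfill, if_pos hge, if_neg hlt]

lemma pvDigitChar_not_sign (d : Nat) (h : d < 10) :
    Nat.digitChar d ≠ '+' ∧ Nat.digitChar d ≠ '-' := by
  interval_cases d <;> decide

-- ===== VERDICT (by name: the statement is the Claim_ definition above) =====
theorem decimal_to_four_digit_octal_spec : Claim_equal_decimal_to_four_digit_octal := by
  intro decimal _
  unfold Spec_decimal_to_four_digit_octal decimal_to_four_digit_octal decimal_to_four_digit_octal_alt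
  by_cases hpos : decimal > 0
  · -- positive input
    have hn : decimal = ((decimal.toNat : Nat) : Int) := by omega
    set n := decimal.toNat with hndef
    have hn0 : 0 < n := by omega
    have hloop : pvLoopA decimal 0 1 = (pvON n : Int) := by
      rw [hn, pvLoopA_eq]; ring
    have hchars : PySem.Int.toChars (pvLoopA decimal 0 1) = pvOctChars n := by
      rw [hloop]
      simp only [PySem.Int.toChars]
      rw [if_neg (by omega : ¬ ((pvON n : Int) < 0))]
      simp only [Int.toNat_natCast]
      rw [pvToDigits_eq, pvDec_of_ON n hn0]
    simp only [hchars, if_pos hpos]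
    rw [PySem.Str.zfill]
    obtain ⟨d, cs, hd, heq⟩ := pvDecChars_head (pvON n)
    rw [pvDec_of_ON n hn0] at heq
    obtain ⟨hs1, hs2⟩ := pvDigitChar_not_sign d hd
    rw [heq]
    simp only [String.toList_ofList]
    rw [← pvPad_eq _ _ hs1 hs2]
  · -- decimal ≤ 0 : loop body never runs, octal = 0, str = "0", pad to "0000"
    have hloop : pvLoopA decimal 0 1 = 0 := by rw [pvLoopA]; simp [hpos]
    have hchars : PySem.Int.toChars (pvLoopA decimal 0 1) = ['0'] := by
      rw [hloop]; decide
    simp only [hchars, if_neg hpos]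
    rw [PySem.Str.zfill]
    decide
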